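-- pv_equiv track=rewrite | github.com/mhold3n/server | services/audio-service/src/larrak_audio/enhance.py | _consume_table_block
-- ===== SOURCE A (Python) =====
-- def _consume_table_block(lines: list[str], idx: int, out: list[str]) -> int:
--     cur = idx + 1
--     while cur < len(lines):
--         out.append(lines[cur])
--         next_cur = cur + 1
--         if next_cur >= len(lines) or not lines[next_cur].strip().startswith("|"):
--             return next_cur
--         cur = next_cur
--     return cur
-- ===== SOURCE B (Python) =====
-- def _consume_table_block(lines: list[str], idx: int, out: list[str]) -> int:
--     n = len(lines)
--     if idx + 1 >= n:
--         return idx + 1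
--     end = idx + 2
--     while end < n and lines[end].strip().startswith("|"):
--         end += 1
--     out.extend(lines[idx + 1:end])
--     return end
-- ===== Notes on version B (the rewrite author's own statement) =====
-- stated objective: simpler
-- what changed: B replaces A's interleaved append-and-peek loop with a two-phase decomposition: guard the empty case, scan for the block-end index, then copy the whole block with one slice extend.
import Mathlib
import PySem

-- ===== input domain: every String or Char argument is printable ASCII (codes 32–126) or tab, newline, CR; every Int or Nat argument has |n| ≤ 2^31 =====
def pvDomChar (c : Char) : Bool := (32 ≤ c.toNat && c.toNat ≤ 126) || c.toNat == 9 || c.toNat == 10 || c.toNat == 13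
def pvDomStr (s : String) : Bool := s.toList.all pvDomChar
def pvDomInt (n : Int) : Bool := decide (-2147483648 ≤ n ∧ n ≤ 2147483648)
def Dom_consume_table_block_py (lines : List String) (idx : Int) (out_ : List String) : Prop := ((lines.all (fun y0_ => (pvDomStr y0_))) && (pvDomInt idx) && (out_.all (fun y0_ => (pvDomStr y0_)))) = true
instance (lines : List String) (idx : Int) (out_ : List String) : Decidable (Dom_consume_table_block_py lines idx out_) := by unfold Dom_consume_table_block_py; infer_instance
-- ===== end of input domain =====

-- B separates index-finding (scan for the block end) from the bulk copy instead of
-- A's append-and-peek loop; objective: simpler decomposition, same cost.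
-- Equivalence is about the RETURN value only: both Pythons also mutate `out` (A appends
-- line by line, B extends with one slice), which the caller can observe.

-- ===== PORT A =====
-- A's while loop: append lines[cur], then peek at lines[cur+1]; the appended-to list is
-- threaded as `acc` (it never influences the returned index).
def pvAt (lines : List String) (i : Int) : String :=
  (PySem.List.pyGet? lines i).getD ""

def pvAloop (lines : List String) (cur : Int) (acc : List String) : Int :=
  if cur < (lines.length : Int) then
    let acc' := acc ++ [pvAt lines cur]
    let next := cur + 1
    if (lines.length : Int) ≤ next ∨ ¬ PySem.Str.startswith (PySem.Str.strip (pvAt lines next)) "|" then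
      next
    else pvAloop lines next acc'
  else cur
termination_by ((lines.length : Int) - cur).toNat
decreasing_by omega

def consume_table_block_py (lines : List String) (idx : Int) (out_ : List String) : Int :=
  pvAloop lines (idx + 1) out_

-- ===== PORT B =====
-- B's boundary scan: first index ≥ idx+2 that is past the end or not a '|' line.
def pvBscan (lines : List String) (e : Int) : Int :=
  if e < (lines.length : Int) ∧ PySem.Str.startswith (PySem.Str.strip (pvAt lines e)) "|" then
    pvBscan lines (e + 1)
  else e
termination_by ((lines.length : Int) - e).toNat
decreasing_by omega

def consume_table_block_py_alt (lines : List String) (idx : Int) (out_ : List String) : Int :=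
  if (lines.length : Int) ≤ idx + 1 then idx + 1
  else
    let e := pvBscan lines (idx + 2)
    let _ := out_ ++ PySem.List.slice lines (some (idx + 1)) (some e)  -- out.extend(lines[idx+1:end])
    e

-- ===== PRECONDITION & SPEC =====
-- Pre_ excludes only inputs where Python A raises IndexError: idx+1 below -len(lines),
-- where lines[idx+1] is out of range even after negative-index wraparound.
def Pre_consume_table_block_py (lines : List String) (idx : Int) (out_ : List String) : Prop :=
  -(lines.length : Int) ≤ idx + 1
instance (lines : List String) (idx : Int) (out_ : List String) : Decidable (Pre_consume_table_block_py lines idx out_) := by unfold Pre_consume_table_block_py; infer_instance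

def pvWitness_consume_table_block_py : List String × Int × List String :=
  (["# t", "| a |", "| b |", "done"], 0, ["x"])

def Spec_consume_table_block_py (lines : List String) (idx : Int) (out_ : List String) (out : Int) : Prop := out = consume_table_block_py_alt lines idx out_
instance (lines : List String) (idx : Int) (out_ : List String) (out : Int) : Decidable (Spec_consume_table_block_py lines idx out_ out) := by unfold Spec_consume_table_block_py; infer_instance

-- ===== CLAIM (what is proved, stated in full; the proofs are below) =====
def Claim_equal_consume_table_block_py : Prop := ∀ (lines : List String) (idx : Int) (out_ : List String), Dom_consume_table_block_py lines idx out_ → Pre_consume_table_block_py lines idx out_ → Spec_consume_table_block_py lines idx out_ (consume_table_block_py lines idx out_)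

-- ===== LEMMAS AND PROOFS =====

-- A's loop, once entered at `cur < len`, returns exactly B's boundary scan from cur+1.
theorem pvAloop_eq_pvBscan (lines : List String) (cur : Int) (acc : List String)
    (h : cur < (lines.length : Int)) :
    pvAloop lines cur acc = pvBscan lines (cur + 1) := by
  rw [pvAloop, if_pos h]
  by_cases hc : (lines.length : Int) ≤ cur + 1 ∨
      ¬ PySem.Str.startswith (PySem.Str.strip (pvAt lines (cur + 1))) "|"
  · rw [if_pos hc, pvBscan, if_neg]
    intro ⟨h1, h2⟩
    rcases hc with hc | hc
    · omega
    · exact hc h2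
  · rw [if_neg hc]
    simp only [not_or, not_not, not_le] at hc
    have ih := pvAloop_eq_pvBscan lines (cur + 1) (acc ++ [pvAt lines cur]) hc.1
    rw [ih]
    conv_rhs => rw [pvBscan, if_pos ⟨hc.1, hc.2⟩]
termination_by ((lines.length : Int) - cur).toNat
decreasing_by omega

-- ===== VERDICT (by name: the statement is the Claim_ definition above) =====
theorem consume_table_block_py_spec : Claim_equal_consume_table_block_py := by
  intro lines idx out_ _ _
  unfold Spec_consume_table_block_py consume_table_block_py consume_table_block_py_alt
  by_cases h : (lines.length : Int) ≤ idx + 1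
  · rw [if_pos h, pvAloop, if_neg (by omega)]
  · rw [if_neg h]
    have h2 := pvAloop_eq_pvBscan lines (idx + 1) out_ (by omega)
    rw [show idx + 1 + 1 = idx + 2 by ring] at h2
    exact h2
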